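-- pv_equiv track=rewrite | github.com/DimoDimov99/python-problems | solutions/iban_formatter.py | iban_formatter
-- ===== SOURCE A (Python) =====
-- def iban_formatter(iban):
--     counter = 0
--     result = []
--     for character in iban:
--         if character == " ":
--             continue
--         result.append(character)
--         counter += 1
--
--         if counter == 4:
--             result.append(" ")
--             counter = 0
--
--     result = "".join(result)
--     return result
-- ===== SOURCE B (Python) =====
-- def iban_formatter(iban):
--     cleaned = "".join(c for c in iban if c != " ")
--     parts = []
--     for i in range(0, len(cleaned), 4):
--         block = cleaned[i:i+4]
--         parts.append(block)
--         if len(block) == 4: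
--             parts.append(" ")
--     return "".join(parts)
-- ===== Notes on version B (the rewrite author's own statement) =====
-- stated objective: alternative
-- what changed: Replaces A's single per-character loop with a mutable block counter by a two-pass decomposition: first strip spaces, then iterate over fixed 4-character slices, appending a space only after full blocks.
import Mathlib
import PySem

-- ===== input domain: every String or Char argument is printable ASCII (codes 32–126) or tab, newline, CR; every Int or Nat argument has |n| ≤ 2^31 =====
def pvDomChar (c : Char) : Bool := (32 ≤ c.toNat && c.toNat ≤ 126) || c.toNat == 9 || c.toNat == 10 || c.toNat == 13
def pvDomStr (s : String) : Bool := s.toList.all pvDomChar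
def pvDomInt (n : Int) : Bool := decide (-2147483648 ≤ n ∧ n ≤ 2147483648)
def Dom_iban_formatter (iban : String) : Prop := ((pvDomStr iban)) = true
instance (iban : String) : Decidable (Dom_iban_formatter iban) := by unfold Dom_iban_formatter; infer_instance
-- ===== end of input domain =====

-- B regroups the IBAN by stripping spaces first and then slicing fixed 4-char blocks,
-- instead of A's per-character counter loop (objective: alternative decomposition, same cost).

-- ===== PORT A =====
-- A's for-loop over the characters with state (counter, result).
def pvLoopA : List Char → Nat → List Char → List Char
  | [], _, res => res
  | ch :: rest, counter, res =>
    if ch = ' ' then pvLoopA rest counter res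
    else
      if counter + 1 = 4 then pvLoopA rest 0 (res ++ [ch] ++ [' '])
      else pvLoopA rest (counter + 1) (res ++ [ch])

def iban_formatter (iban : String) : String :=
  String.ofList (pvLoopA iban.toList 0 [])

-- ===== PORT B =====
-- B's 'for i in range(0, len(cleaned), 4)' slice loop: each step takes cleaned[i:i+4];
-- ported as structural recursion consuming 4 characters per step.
def pvChunksB : List Char → List Char
  | [] => []
  | ch :: rest =>
    let block := (ch :: rest).take 4
    block ++ (if block.length = 4 then [' '] else []) ++ pvChunksB ((ch :: rest).drop 4)
termination_by l => l.length
decreasing_by simp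

def iban_formatter_alt (iban : String) : String :=
  String.ofList (pvChunksB (iban.toList.filter (fun c => c != ' ')))

-- ===== PRECONDITION & SPEC =====
def Spec_iban_formatter (iban : String) (out : String) : Prop := out = iban_formatter_alt iban
instance (iban : String) (out : String) : Decidable (Spec_iban_formatter iban out) := by unfold Spec_iban_formatter; infer_instance

-- ===== CLAIM (what is proved, stated in full; the proofs are below) =====
def Claim_equal_iban_formatter : Prop := ∀ (iban : String), Dom_iban_formatter iban → Spec_iban_formatter iban (iban_formatter iban)

-- ===== LEMMAS AND PROOFS =====

theorem pvChunksB_nil : pvChunksB [] = [] := by rw [pvChunksB]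

theorem pvChunksB_cons (ch : Char) (rest : List Char) :
    pvChunksB (ch :: rest) =
      (ch :: rest).take 4 ++ (if ((ch :: rest).take 4).length = 4 then [' '] else [])
        ++ pvChunksB ((ch :: rest).drop 4) := by
  rw [pvChunksB]

-- A's loop ignores spaces, so it equals the loop over the space-filtered list.
theorem pvLoopA_filter (l : List Char) : ∀ c res,
    pvLoopA l c res = pvLoopA (l.filter (fun ch => ch != ' ')) c res := by
  induction l with
  | nil => intro c res; rfl
  | cons a t ih =>
    intro c res
    by_cases ha : a = ' '
    · simp [pvLoopA, ha, ih]
    · simp only [List.filter_cons, ha, bne_iff_ne, ne_eq, not_false_iff, if_pos]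
      simp [pvLoopA, ha]
      split
      · rw [ih]
      · rw [ih]

-- On a space-free list, A's counter loop produces exactly B's 4-chunks.
theorem pvLoopA_clean (l : List Char) (h : ∀ c ∈ l, c ≠ ' ') :
    ∀ res, pvLoopA l 0 res = res ++ pvChunksB l := by
  match l with
  | [] => intro res; simp [pvLoopA, pvChunksB_nil]
  | [a] =>
    intro res
    have ha := h a (by simp)
    simp [pvLoopA, pvChunksB_cons, pvChunksB_nil, ha]
  | [a, b] =>
    intro res
    have ha := h a (by simp); have hb := h b (by simp)
    simp [pvLoopA, pvChunksB_cons, pvChunksB_nil, ha, hb]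
  | [a, b, c] =>
    intro res
    have ha := h a (by simp); have hb := h b (by simp); have hc := h c (by simp)
    simp [pvLoopA, pvChunksB_cons, pvChunksB_nil, ha, hb, hc]
  | a :: b :: c :: d :: rest =>
    intro res
    have ha := h a (by simp); have hb := h b (by simp)
    have hc := h c (by simp); have hd := h d (by simp)
    have ih := pvLoopA_clean rest (fun x hx => h x (by simp [hx]))
    simp [pvLoopA, ha, hb, hc, hd, ih, pvChunksB_cons]
termination_by l.length

-- ===== VERDICT (by name: the statement is the Claim_ definition above) =====
theorem iban_formatter_spec : Claim_equal_iban_formatter := by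
  intro iban _
  unfold Spec_iban_formatter iban_formatter iban_formatter_alt
  rw [pvLoopA_filter]
  rw [pvLoopA_clean]
  · rfl
  · intro c hc
    simpa using (List.of_mem_filter hc)
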